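-- pv_equiv track=rewrite | github.com/siegelzero/rosemary | rosemary/number_theory/core.py | integer_log
-- ===== SOURCE A (Python) =====
-- def integer_log(b, n):
--     """Returns the base-b integer logarithm of n.
--
--     Given a positive integers n and b, this function returns the integer k such
--     that b**k <= a < b**(k + 1).
--
--     Input:
--         * b: int (b >= 2)
--             The base of the logarithm.
--
--         * n: int (n >= 1)
--             The argument of the logarithm.
--
--     Returns:
--         * k: int
--             The integer such that b**k <= a < b**(k + 1).
--
--     Raises:
--         * ValueError: If base b <= 1 or n <= 0.
--
--     Examples:
--         >>> integer_log(2, 100)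
--         6
--         >>> integer_log(5, 30)
--         2
--         >>> integer_log(5, 2)
--         0
--         >>> integer_log(1, 40)
--         Traceback (most recent call last):
--         ...
--         ValueError: integer_log: Must have b >= 2.
--         >>> integer_log(2, 0)
--         Traceback (most recent call last):
--         ...
--         ValueError: integer_log: Must have n >= 1.
--
--     Details:
--         This function computes powers b, b**2, b**4, b**8, b**16, ..., and then
--         performs a binary search. This gives the algorithm a logarithmic runtime
--         instead of the linear runtime of the naive search method.
--     """
--     if b <= 1:
--         raise ValueError("integer_log: Must have b >= 2.")
--     if n <= 0:
--         raise ValueError("integer_log: Must have n >= 1.")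
--
--     if n < b:
--         return 0
--
--     if b == 2:
--         return n.bit_length() - 1
--
--     p = b
--     hi = 1
--
--     # Look at b, b^2, b^4, b^8,... to find in which interval a lives
--     while p <= n:
--         p *= p
--         lo = hi
--         hi <<= 1
--
--     # Now we know that b^lo <= a <= b^hi perform a binary search on this
--     # interval to find the exact value k so that b^k <= a < b^(k + 1)
--     while hi - lo > 1:
--         mid = (lo + hi) >> 1
--         power = b**mid
--
--         if power > n:
--             hi = mid
--         elif power < n:
--             lo = mid
--         else:
--             return mid
--
--     return lo
-- ===== SOURCE B (Python) =====
-- def integer_log(b, n):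
--     """Returns the base-b integer logarithm of n (largest k with b**k <= n)."""
--     if b <= 1:
--         raise ValueError("integer_log: Must have b >= 2.")
--     if n <= 0:
--         raise ValueError("integer_log: Must have n >= 1.")
--     p = b
--     k = 0
--     while p <= n:
--         p *= b
--         k += 1
--     return k
-- ===== Notes on version B (the rewrite author's own statement) =====
-- stated objective: simpler
-- what changed: Replaces the bit_length shortcut plus the squaring/doubling bracket and binary search by a single multiply-and-count loop (p*=b; k+=1 while p<=n).
import Mathlib
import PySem

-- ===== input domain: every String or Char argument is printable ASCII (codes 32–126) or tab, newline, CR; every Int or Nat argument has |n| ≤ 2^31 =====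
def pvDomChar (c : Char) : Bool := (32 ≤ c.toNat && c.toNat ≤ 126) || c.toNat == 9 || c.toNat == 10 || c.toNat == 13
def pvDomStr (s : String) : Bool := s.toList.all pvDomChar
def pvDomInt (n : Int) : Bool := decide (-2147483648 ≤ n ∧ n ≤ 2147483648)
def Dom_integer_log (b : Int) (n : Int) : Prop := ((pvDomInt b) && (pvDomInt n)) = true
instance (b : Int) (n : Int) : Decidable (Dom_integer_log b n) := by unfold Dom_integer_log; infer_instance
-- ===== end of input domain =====

-- B replaces A's doubling bracket + binary search (and b=2 bit_length shortcut) by one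
-- multiply-and-count loop; equivalence is proved on Pre_ (the non-raising inputs).

-- ===== PORT A =====
-- doubling phase: while p <= n: p *= p; lo = hi; hi <<= 1   (hi <<= 1 ported as hi * 2)
def pvDoubleLoop (fuel : Nat) (n p lo hi : Int) : Int × Int :=
  match fuel with
  | 0 => (lo, hi)
  | fuel + 1 => if p ≤ n then pvDoubleLoop fuel n (p * p) hi (hi * 2) else (lo, hi)

-- binary search: while hi - lo > 1: mid = (lo+hi) >> 1; power = b**mid; ...
-- ((lo+hi) >> 1 ported as floordiv (lo+hi) 2; b**mid as b ^ mid.toNat — mid ≥ 1 at every use)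
def pvBSearch (fuel : Nat) (b n lo hi : Int) : Int :=
  match fuel with
  | 0 => lo
  | fuel + 1 =>
    if hi - lo > 1 then
      let mid := PySem.Int.floordiv (lo + hi) 2
      let power := b ^ mid.toNat
      if power > n then pvBSearch fuel b n lo mid
      else if power < n then pvBSearch fuel b n mid hi
      else mid
    else lo

def integer_log (b : Int) (n : Int) : Int :=
  if n < b then 0
  else if b = 2 then (PySem.Int.bitLength n : Int) - 1
  else
    -- lo is first written on the doubling loop's first pass (which runs: b ≤ n here);
    -- 0 is a dummy initial value, never read.
    let r := pvDoubleLoop (n.toNat + 1) n b 0 1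
    pvBSearch (r.2 - r.1).toNat b n r.1 r.2

-- ===== PORT B =====
-- while p <= n: p *= b; k += 1
def pvAltLoop (fuel : Nat) (b n p k : Int) : Int :=
  match fuel with
  | 0 => k
  | fuel + 1 => if p ≤ n then pvAltLoop fuel b n (p * b) (k + 1) else k

def integer_log_alt (b : Int) (n : Int) : Int := pvAltLoop (n.toNat + 1) b n b 0

-- ===== PRECONDITION & SPEC =====
-- Pre_ excludes exactly the inputs on which A raises ValueError (b <= 1 or n <= 0).
def Pre_integer_log (b : Int) (n : Int) : Prop := 2 ≤ b ∧ 1 ≤ n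
instance (b : Int) (n : Int) : Decidable (Pre_integer_log b n) := by unfold Pre_integer_log; infer_instance
def pvWitness_integer_log : Int × Int := (5, 30)

def Spec_integer_log (b : Int) (n : Int) (out : Int) : Prop := out = integer_log_alt b n
instance (b : Int) (n : Int) (out : Int) : Decidable (Spec_integer_log b n out) := by unfold Spec_integer_log; infer_instance

-- ===== CLAIM (what is proved, stated in full; the proofs are below) =====
def Claim_equal_integer_log : Prop := ∀ (b : Int) (n : Int), Dom_integer_log b n → Pre_integer_log b n → Spec_integer_log b n (integer_log b n)

-- ===== LEMMAS AND PROOFS =====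

-- "k is the base-b integer log of n"
def pvGood (b n k : Int) : Prop := 0 ≤ k ∧ b ^ k.toNat ≤ n ∧ n < b ^ (k.toNat + 1)

theorem pvGood_unique {b n k k' : Int} (hb : 2 ≤ b) (h : pvGood b n k) (h' : pvGood b n k') :
    k = k' := by
  obtain ⟨hk0, hk1, hk2⟩ := h
  obtain ⟨hk0', hk1', hk2'⟩ := h'
  have hb1 : (1 : Int) ≤ b := by omega
  by_contra hne
  rcases lt_or_gt_of_ne hne with hlt | hlt
  · have : k.toNat + 1 ≤ k'.toNat := by omega
    have := pow_le_pow_right₀ hb1 this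
    omega
  · have : k'.toNat + 1 ≤ k.toNat := by omega
    have := pow_le_pow_right₀ hb1 this
    omega

theorem pvAltLoop_good {b n : Int} (hb : 2 ≤ b) (hn : 1 ≤ n) :
    ∀ (fuel : Nat) (p k : Int), 0 ≤ k → p = b ^ (k.toNat + 1) → b ^ k.toNat ≤ n →
      n < b ^ (k.toNat + fuel + 1) → pvGood b n (pvAltLoop fuel b n p k) := by
  intro fuel
  induction fuel with
  | zero =>
    intro p k hk0 hp hlow hbound
    simpa [pvAltLoop, pvGood, hk0, hlow] using And.intro hk0 (And.intro hlow (by simpa using hbound))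
  | succ fuel ih =>
    intro p k hk0 hp hlow hbound
    simp only [pvAltLoop]
    by_cases hc : p ≤ n
    · simp only [hc, if_true]
      have hk1 : (k + 1).toNat = k.toNat + 1 := by omega
      apply ih (p * b) (k + 1) (by omega)
      · rw [hp, hk1]; ring
      · rw [hk1, ← hp]; exact hc
      · rw [hk1]
        have : k.toNat + 1 + fuel + 1 = k.toNat + (fuel + 1) + 1 := by omega
        rw [this]; exact hbound
    · simp only [hc, if_false]
      refine ⟨hk0, hlow, ?_⟩
      rw [← hp]; omega

-- n < b ^ e whenever n.toNat < e (using 2 ≤ b)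
theorem pv_lt_pow {b n : Int} (hb : 2 ≤ b) (hn : 1 ≤ n) {e : Nat} (he : n.toNat < e) :
    n < b ^ e := by
  have h2 : (2 : Int) ^ e ≤ b ^ e := pow_le_pow_left₀ (by omega) hb e
  have h4 : (n.toNat : Int) < (2 : Int) ^ e := by
    have := Nat.lt_of_lt_of_le he (Nat.le_of_lt Nat.lt_two_pow_self)
    exact_mod_cast this
  have : (n.toNat : Int) = n := by omega
  omega

theorem pvDoubleLoop_good {b n : Int} (hb : 2 ≤ b) (hn : 1 ≤ n) :
    ∀ (fuel : Nat) (p lo hi : Int), 0 ≤ lo → lo < hi →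
      p = b ^ hi.toNat → b ^ lo.toNat ≤ n → n < b ^ ((2 ^ fuel) * hi).toNat →
      0 ≤ (pvDoubleLoop fuel n p lo hi).1 ∧
      (pvDoubleLoop fuel n p lo hi).1 < (pvDoubleLoop fuel n p lo hi).2 ∧
      b ^ (pvDoubleLoop fuel n p lo hi).1.toNat ≤ n ∧
      n < b ^ (pvDoubleLoop fuel n p lo hi).2.toNat := by
  intro fuel
  induction fuel with
  | zero =>
    intro p lo hi hlo0 hlh hp hlow hbound
    simp only [pvDoubleLoop]
    refine ⟨hlo0, hlh, hlow, ?_⟩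
    simpa using hbound
  | succ fuel ih =>
    intro p lo hi hlo0 hlh hp hlow hbound
    simp only [pvDoubleLoop]
    by_cases hc : p ≤ n
    · simp only [hc, if_true]
      have hhi0 : 0 ≤ hi := by omega
      have h2hi : (hi * 2).toNat = hi.toNat + hi.toNat := by omega
      apply ih (p * p) hi (hi * 2) hhi0 (by omega)
      · rw [hp, h2hi]; ring
      · rw [← hp]; exact hc
      · have : ((2 ^ (fuel + 1) : Int) * hi).toNat = ((2 ^ fuel : Int) * (hi * 2)).toNat := by
          congr 1; ring
        rw [← this]; exact hbound
    · simp only [hc, if_false]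
      refine ⟨hlo0, hlh, hlow, ?_⟩
      rw [← hp]; omega

theorem pvBSearch_good {b n : Int} (hb : 2 ≤ b) (hn : 1 ≤ n) :
    ∀ (fuel : Nat) (lo hi : Int), 0 ≤ lo → lo < hi → hi - lo ≤ (fuel : Int) →
      b ^ lo.toNat ≤ n → n < b ^ hi.toNat → pvGood b n (pvBSearch fuel b n lo hi) := by
  intro fuel
  induction fuel with
  | zero => intro lo hi hlo0 hlh hgap; omega
  | succ fuel ih =>
    intro lo hi hlo0 hlh hgap hlow hhigh
    simp only [pvBSearch]
    by_cases hc : hi - lo > 1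
    · simp only [hc, if_true]
      have hfd : PySem.Int.floordiv (lo + hi) 2 = (lo + hi) / 2 :=
        PySem.Int.floordiv_eq_ediv_of_pos (by omega)
      set mid := PySem.Int.floordiv (lo + hi) 2 with hmid
      have hmlo : lo < mid := by omega
      have hmhi : mid < hi := by omega
      by_cases h1 : b ^ mid.toNat > n
      · simp only [h1, if_true]
        apply ih lo mid hlo0 hmlo (by omega) hlow (by omega)
      · simp only [h1, if_false]
        by_cases h2 : b ^ mid.toNat < n
        · simp only [h2, if_true]
          apply ih mid hi (by omega) hmhi (by omega) (by omega) hhigh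
        · simp only [h2, if_false]
          have heq : b ^ mid.toNat = n := by omega
          refine ⟨by omega, by omega, ?_⟩
          have : b ^ (mid.toNat + 1) = b ^ mid.toNat * b := by ring
          rw [this, heq]
          nlinarith
    · simp only [hc, if_false]
      have hhi : hi.toNat = lo.toNat + 1 := by omega
      refine ⟨hlo0, hlow, ?_⟩
      rw [← hhi]; exact hhigh

theorem pvAlt_good {b n : Int} (hb : 2 ≤ b) (hn : 1 ≤ n) : pvGood b n (integer_log_alt b n) := by
  unfold integer_log_alt
  apply pvAltLoop_good hb hn (n.toNat + 1) b 0 le_rfl (by norm_num) (by simpa using hn)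
  exact pv_lt_pow hb hn (by omega)

theorem pvA_good {b n : Int} (hb : 2 ≤ b) (hn : 1 ≤ n) : pvGood b n (integer_log b n) := by
  unfold integer_log
  by_cases h1 : n < b
  · simp only [h1, if_true]
    exact ⟨le_rfl, by simpa using hn, by simpa using h1⟩
  · simp only [h1, if_false]
    by_cases h2 : b = 2
    · simp only [h2, if_true]
      subst h2
      have hn2 : 2 ≤ n := by omega
      set s := PySem.Int.bitLength n with hs
      have hna : n.natAbs = n.toNat := by omega
      have hnz : n ≠ 0 := by omega
      have hub : n.toNat < 2 ^ s := by
        rw [← hna]; exact PySem.Int.lt_two_pow_bitLength n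
      have hlb : 2 ^ (s - 1) ≤ n.toNat := by
        rw [← hna]; exact PySem.Int.two_pow_bitLength_le n hnz
      have hs1 : 1 ≤ s := by
        by_contra hc
        interval_cases s
        · simp at hub; omega
      have htn : ((s : Int) - 1).toNat = s - 1 := by omega
      refine ⟨by omega, ?_, ?_⟩
      · rw [htn]
        have : ((2 : Int)) ^ (s - 1) = ((2 ^ (s - 1) : Nat) : Int) := by push_cast; ring
        rw [this]; omega
      · rw [htn]
        have hse : s - 1 + 1 = s := by omega
        rw [hse]
        have : ((2 : Int)) ^ s = ((2 ^ s : Nat) : Int) := by push_cast; ring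
        rw [this]; omega
    · simp only [h2, if_false]
      have hdl := pvDoubleLoop_good hb hn (n.toNat + 1) b 0 1 le_rfl (by norm_num)
        (by norm_num) (by simpa using hn) ?bound
      case bound =>
        have hcast : ((2 ^ (n.toNat + 1) : Int) * 1).toNat = 2 ^ (n.toNat + 1) := by
          rw [mul_one]
          have h : ((2 : Int) ^ (n.toNat + 1)) = ((2 ^ (n.toNat + 1) : Nat) : Int) := by
            push_cast; ring
          rw [h, Int.toNat_natCast]
        rw [hcast]
        apply pv_lt_pow hb hn
        calc n.toNat < 2 ^ n.toNat := Nat.lt_two_pow_self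
          _ ≤ 2 ^ (n.toNat + 1) := Nat.pow_le_pow_right (by norm_num) (Nat.le_succ _)
      obtain ⟨g0, g1, g2, g3⟩ := hdl
      exact pvBSearch_good hb hn _ _ _ g0 g1 (by omega) g2 g3

-- ===== VERDICT (by name: the statement is the Claim_ definition above) =====
theorem integer_log_spec : Claim_equal_integer_log := by
  intro b n _ hpre
  obtain ⟨hb, hn⟩ := hpre
  unfold Spec_integer_log
  exact pvGood_unique hb (pvA_good hb hn) (pvAlt_good hb hn)
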